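-- pv_equiv track=rewrite | github.com/Aplopio/htmldiff | rbox_htmldiff.py | html2list
-- ===== SOURCE A (Python) =====
-- import difflib, string
--
-- def html2list(x, b=0):
-- 	mode = 'char'
-- 	cur = ''
-- 	out = []
-- 	for c in x:
-- 		if mode == 'tag':
-- 			if c == '>':
-- 				if b: cur += ']'
-- 				else: cur += c
-- 				out.append(cur); cur = ''; mode = 'char'
-- 			else: cur += c
-- 		elif mode == 'char':
-- 			if c == '<':
-- 				out.append(cur)
-- 				if b: cur = '['
-- 				else: cur = c
-- 				mode = 'tag'
-- 			elif c in string.whitespace: out.append(cur+c); cur = ''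
-- 			else: cur += c
-- 	out.append(cur)
-- 	return [x for x in out if x is not '']
-- ===== SOURCE B (Python) =====
-- def html2list(x, b=0):
--     ws = ' \t\n\r\x0b\x0c'
--     out = []
--     rest = x
--     while rest:
--         if rest[0] == '<':
--             inner, sep, rest = rest[1:].partition('>')
--             out.append(('[' + inner + (']' if sep else '')) if b else ('<' + inner + sep))
--         elif rest[0] in ws:
--             out.append(rest[0])
--             rest = rest[1:]
--         else:
--             j = 0
--             while j < len(rest) and rest[j] != '<' and rest[j] not in ws:
--                 j += 1
--             if j < len(rest) and rest[j] in ws: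
--                 out.append(rest[:j + 1])
--                 rest = rest[j + 1:]
--             else:
--                 out.append(rest[:j])
--                 rest = rest[j:]
--     return out
-- ===== Notes on version B (the rewrite author's own statement) =====
-- stated objective: alternative
-- what changed: Replaces the char-by-char mode/cur state machine (plus final empty-token filter) with a token-at-a-time scanner that slices off a whole tag via str.partition at the tag terminator or a whole word via a bounded scan, emitting each complete token directly so no empty tokens ever arise.
import Mathlib
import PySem

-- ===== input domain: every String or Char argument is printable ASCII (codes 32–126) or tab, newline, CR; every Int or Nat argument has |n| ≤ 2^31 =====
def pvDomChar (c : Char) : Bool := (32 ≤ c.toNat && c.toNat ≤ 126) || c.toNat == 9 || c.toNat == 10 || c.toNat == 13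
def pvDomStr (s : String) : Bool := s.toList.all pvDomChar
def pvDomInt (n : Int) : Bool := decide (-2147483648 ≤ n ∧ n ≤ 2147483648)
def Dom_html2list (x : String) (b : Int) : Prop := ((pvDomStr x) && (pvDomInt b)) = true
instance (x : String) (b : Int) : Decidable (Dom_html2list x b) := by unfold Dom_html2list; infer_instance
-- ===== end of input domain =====

-- B replaces A's char-by-char mode/cur state machine (with a final empty-token filter) by a
-- token-at-a-time scanner (whole tag via partition('>'), whole word via a bounded scan); same
-- return value on all inputs.

-- ===== PORT A =====

-- string.whitespace = ' \t\n\r\x0b\x0c'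
def pyWhitespace : List Char := [' ', '\t', '\n', '\r', '\x0b', '\x0c']

-- one iteration of A's for-loop; state = (mode == 'tag', cur, out)
def htmlStep (b : Int) (st : Bool × List Char × List String) (c : Char) :
    Bool × List Char × List String :=
  let (tag, cur, out) := st
  if tag then
    if c = '>' then
      let cur' := if b ≠ 0 then cur ++ [']'] else cur ++ [c]
      (false, [], out ++ [String.ofList cur'])
    else (true, cur ++ [c], out)
  else
    if c = '<' then
      (true, (if b ≠ 0 then ['['] else [c]), out ++ [String.ofList cur])
    else if c ∈ pyWhitespace then
      (false, [], out ++ [String.ofList (cur ++ [c])])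
    else (false, cur ++ [c], out)

def html2list (x : String) (b : Int) : List String :=
  let fin := x.toList.foldl (htmlStep b) (false, [], [])
  (fin.2.2 ++ [String.ofList fin.2.1]).filter (fun s => s ≠ "")

-- ===== PORT B =====

def wordChar (c : Char) : Bool := c ≠ '<' ∧ c ∉ pyWhitespace

-- B's while-loop over the remaining input; tag branch = partition('>'), word branch = the
-- inner index scan (takeWhile/dropWhile is the List Char transcription of Source B's slicing).
def altGo (b : Int) : List Char → List String
  | [] => []
  | c :: cs =>
    if hlt : c = '<' then
      let inner := cs.takeWhile (fun d => d ≠ '>')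
      let r := cs.dropWhile (fun d => d ≠ '>')
      if hr : r = [] then [String.ofList ((if b ≠ 0 then '[' else '<') :: inner)]
      else
        (if b ≠ 0 then String.ofList ('[' :: (inner ++ [']']))
         else String.ofList ('<' :: (inner ++ ['>']))) :: altGo b r.tail
    else if hws : c ∈ pyWhitespace then
      String.ofList [c] :: altGo b cs
    else
      let w := (c :: cs).takeWhile wordChar
      let r := (c :: cs).dropWhile wordChar
      if hr : r = [] then [String.ofList w]
      else if r.head hr ∈ pyWhitespace then
        String.ofList (w ++ [r.head hr]) :: altGo b r.tail
      else String.ofList w :: altGo b r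
  termination_by cs => cs.length
  decreasing_by
  · have h2 := List.length_dropWhile_le (fun d => (d ≠ '>' : Bool)) cs
    have h4 : (List.dropWhile (fun d => (d ≠ '>' : Bool)) cs) ≠ [] := hr
    have h5 : 0 < (List.dropWhile (fun d => (d ≠ '>' : Bool)) cs).length :=
      List.length_pos_of_ne_nil h4
    simp_all [List.length_tail]; omega
  · simp
  · have hwc : wordChar c = true := by simp [wordChar, hlt, hws]
    have h2 := List.length_dropWhile_le wordChar cs
    rw [List.dropWhile_cons_of_pos hwc]
    simp [List.length_tail]; omega
  · have hwc : wordChar c = true := by simp [wordChar, hlt, hws]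
    have h2 := List.length_dropWhile_le wordChar cs
    rw [List.dropWhile_cons_of_pos hwc]
    simp; omega

def html2list_alt (x : String) (b : Int) : List String := altGo b x.toList

-- ===== PRECONDITION & SPEC =====
def Spec_html2list (x : String) (b : Int) (out : List String) : Prop := out = html2list_alt x b
instance (x : String) (b : Int) (out : List String) : Decidable (Spec_html2list x b out) := by unfold Spec_html2list; infer_instance

-- ===== CLAIM (what is proved, stated in full; the proofs are below) =====
def Claim_equal_html2list : Prop := ∀ (x : String) (b : Int), Dom_html2list x b → Spec_html2list x b (html2list x b)

-- ===== LEMMAS AND PROOFS =====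

theorem ofList_eq_empty (l : List Char) : (String.ofList l = "") ↔ l = [] := by
  constructor
  · intro h; have := congrArg String.toList h; simpa using this
  · rintro rfl; rfl

-- T tag cur cs = the tokens A still emits from state (tag, cur, out-prefix dropped)
def runT (b : Int) (tag : Bool) (cur : List Char) (cs : List Char) : List String :=
  let fin := cs.foldl (htmlStep b) (tag, cur, [])
  (fin.2.2 ++ [String.ofList fin.2.1]).filter (fun s => s ≠ "")

theorem runA_out (b : Int) (cs : List Char) (tag : Bool) (cur : List Char) (out : List String) :
    cs.foldl (htmlStep b) (tag, cur, out) =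
      ((cs.foldl (htmlStep b) (tag, cur, [])).1,
       (cs.foldl (htmlStep b) (tag, cur, [])).2.1,
       out ++ (cs.foldl (htmlStep b) (tag, cur, [])).2.2) := by
  induction cs generalizing tag cur out with
  | nil => simp
  | cons c cs ih =>
    simp only [List.foldl_cons]
    rw [ih]
    conv_rhs => rw [ih]
    cases tag with
    | true =>
      by_cases hc : c = '>' <;> simp [htmlStep, hc]
    | false =>
      by_cases hc : c = '<'
      · simp [htmlStep, hc]
      · by_cases hw : c ∈ pyWhitespace <;> simp [htmlStep, hc, hw]

theorem runT_eq (b : Int) (x : String) : html2list x b = runT b false [] x.toList := by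
  simp [html2list, runT]

-- stepping lemma: peel one emitted-token prefix
theorem runT_cons (b : Int) (tag : Bool) (cur : List Char) (c : Char) (cs : List Char) :
    runT b tag cur (c :: cs) =
      (let st := htmlStep b (tag, cur, []) c
       st.2.2.filter (fun s => s ≠ "") ++ runT b st.1 st.2.1 cs) := by
  simp only [runT, List.foldl_cons]
  rw [runA_out b cs (htmlStep b (tag, cur, []) c).1 (htmlStep b (tag, cur, []) c).2.1
        (htmlStep b (tag, cur, []) c).2.2]
  simp [List.filter_append]

theorem L_tag (b : Int) (cs : List Char) (cur : List Char) (h : cur ≠ []) :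
    runT b true cur cs =
      match cs.dropWhile (fun d => d ≠ '>') with
      | [] => [String.ofList (cur ++ cs.takeWhile (fun d => d ≠ '>'))]
      | _ :: rest =>
          String.ofList (cur ++ cs.takeWhile (fun d => d ≠ '>') ++ [if b ≠ 0 then ']' else '>'])
            :: runT b false [] rest := by
  induction cs generalizing cur with
  | nil => simp [runT, ofList_eq_empty, h]
  | cons c cs ih =>
    rw [runT_cons]
    by_cases hc : c = '>'
    · subst hc
      by_cases hb : b = 0 <;>
        simp [htmlStep, hb, List.dropWhile_cons, List.takeWhile_cons, ofList_eq_empty, h, runT]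
    · have hne : cur ++ [c] ≠ [] := by simp
      simp only [htmlStep]
      simp [hc, ih (cur ++ [c]) hne, List.dropWhile_cons, List.takeWhile_cons]

theorem L_word (b : Int) (cs : List Char) (w : List Char) (h : w ≠ []) :
    runT b false w cs =
      match cs.dropWhile wordChar with
      | [] => [String.ofList (w ++ cs.takeWhile wordChar)]
      | d :: rest =>
          if d ∈ pyWhitespace then
            String.ofList (w ++ cs.takeWhile wordChar ++ [d]) :: runT b false [] rest
          else
            String.ofList (w ++ cs.takeWhile wordChar) :: runT b false [] (d :: rest) := by
  induction cs generalizing w with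
  | nil => simp [runT, ofList_eq_empty, h]
  | cons c cs ih =>
    rw [runT_cons]
    by_cases hc : c = '<'
    · subst hc
      have hdw : List.dropWhile wordChar ('<' :: cs) = '<' :: cs := by
        simp [List.dropWhile_cons, wordChar]
      have htw : List.takeWhile wordChar ('<' :: cs) = [] := by
        simp [List.takeWhile_cons, wordChar]
      rw [hdw, htw]
      simp [runT_cons, htmlStep, ofList_eq_empty, h, pyWhitespace]
    · by_cases hw : c ∈ pyWhitespace
      · have hwc : wordChar c = false := by simp [wordChar, hw]
        simp [htmlStep, hc, hw, List.dropWhile_cons, List.takeWhile_cons, hwc,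
          ofList_eq_empty, h]
      · have hwc : wordChar c = true := by simp [wordChar, hc, hw]
        have hne : w ++ [c] ≠ [] := by simp
        simp only [htmlStep]
        simp [hc, hw, ih (w ++ [c]) hne, List.dropWhile_cons, List.takeWhile_cons, hwc]

theorem main_eq (b : Int) (cs : List Char) : runT b false [] cs = altGo b cs := by
  have key : ∀ n (cs : List Char), cs.length ≤ n → runT b false [] cs = altGo b cs := by
    intro n
    induction n with
    | zero =>
      intro cs hlen
      have : cs = [] := by cases cs <;> simp_all
      subst this
      simp [runT, altGo]
    | succ n ih =>
      intro cs hlen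
      cases cs with
      | nil => simp [runT, altGo]
      | cons c cs =>
        simp only [List.length_cons, Nat.succ_le_succ_iff] at hlen
        by_cases hc : c = '<'
        · subst hc
          rw [runT_cons]
          simp only [htmlStep]
          rw [show altGo b ('<' :: cs) = _ from by rw [altGo.eq_def]]
          simp only []
          rw [dif_pos trivial]
          by_cases hb : b = 0 <;> simp [hb] <;>
            [ rw [L_tag 0 cs ['<'] (by simp)]; rw [L_tag b cs ['['] (by simp)] ] <;>
            simp only [ne_eq, decide_not, hb] <;>
            (cases hd : List.dropWhile (fun d => !decide (d = '>')) cs with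
             | nil =>
               have hd' : List.dropWhile (fun d => decide ¬d = '>') cs = [] := by
                 rw [show (fun d => decide ¬d = '>') = (fun d => !decide (d = '>')) from
                   funext fun d => by simp]; exact hd
               split <;> simp_all
             | cons d rest =>
               have hd' : List.dropWhile (fun d => decide ¬d = '>') cs = d :: rest := by
                 rw [show (fun d => decide ¬d = '>') = (fun d => !decide (d = '>')) from
                   funext fun d => by simp]; exact hd
               have h2 := List.length_dropWhile_le (fun d => !decide (d = '>')) cs
               rw [hd] at h2; simp at h2
               have hall : ¬ ∀ x ∈ cs, ¬x = '>' := by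
                 intro hall
                 have : List.dropWhile (fun d => !decide (d = '>')) cs = [] :=
                   List.dropWhile_eq_nil_iff.mpr (by simpa using hall)
                 simp [this] at hd
               split <;> simp_all [ih rest (by omega)] <;>
                 (rw [if_neg (fun hno => (hno '>' hall) rfl)]
                  exact congrArg (List.cons _) (ih _ (by omega))))
        · by_cases hw : c ∈ pyWhitespace
          · rw [runT_cons]
            simp only [htmlStep]
            rw [show altGo b (c :: cs) = _ from by rw [altGo.eq_def]]
            simp only []
            rw [dif_neg hc, dif_pos hw]
            simp [hc, hw, ih cs hlen]
          · have hwc : wordChar c = true := by simp [wordChar, hc, hw]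
            rw [runT_cons]
            simp only [htmlStep]
            simp [hc, hw]
            rw [L_word b cs [c] (by simp)]
            rw [show altGo b (c :: cs) = _ from by rw [altGo.eq_def]]
            simp only []
            rw [dif_neg hc, dif_neg hw]
            rw [List.dropWhile_cons_of_pos hwc, List.takeWhile_cons_of_pos hwc]
            cases hd : List.dropWhile wordChar cs with
            | nil => simp
            | cons d rest =>
              have h2 := List.length_dropWhile_le wordChar cs
              rw [hd] at h2; simp at h2
              by_cases hdw : d ∈ pyWhitespace
              · simp [hd, hdw, ih rest (by omega)]
              · simp [hdw, ih (d :: rest) (by simp; omega)]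
  exact key cs.length cs le_rfl

-- ===== VERDICT (by name: the statement is the Claim_ definition above) =====
theorem html2list_spec : Claim_equal_html2list := by
  intro x b _
  show html2list x b = html2list_alt x b
  rw [runT_eq, main_eq]; rfl
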